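-- pv_equiv track=rewrite | github.com/gihnacarato/Invasao | A_invasão.py | geraSeq
-- ===== SOURCE A (Python) =====
-- def geraSeq(n):
--     L = []
--     x = 1
--     j = 0
--     for i in range(0, n):
--         x += j
--         L.append(x)
--         j += 1
--     return L
-- ===== SOURCE B (Python) =====
-- def geraSeq(n):
--     return [1 + i * (i + 1) // 2 for i in range(n)]
-- ===== Notes on version B (the rewrite author's own statement) =====
-- stated objective: simpler
-- what changed: Replaced the stateful accumulator loop (running sum x and increment j) with a one-line comprehension computing each element independently by the closed form 1 + i*(i+1)//2.
import Mathlib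
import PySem

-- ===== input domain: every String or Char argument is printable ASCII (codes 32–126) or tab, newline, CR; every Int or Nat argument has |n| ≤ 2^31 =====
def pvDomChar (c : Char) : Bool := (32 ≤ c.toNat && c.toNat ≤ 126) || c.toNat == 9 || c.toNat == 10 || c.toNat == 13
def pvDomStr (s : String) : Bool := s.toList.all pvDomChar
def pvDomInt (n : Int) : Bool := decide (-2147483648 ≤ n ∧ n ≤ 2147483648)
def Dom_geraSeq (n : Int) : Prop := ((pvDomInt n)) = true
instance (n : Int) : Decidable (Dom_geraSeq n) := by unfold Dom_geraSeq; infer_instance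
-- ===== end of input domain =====

-- B replaces A's accumulator loop (running sum x, increment j) with a per-index
-- closed form 1 + i*(i+1)//2 in a comprehension; objective: simpler.

-- ===== PORT A =====
-- loop body: x += j; L.append(x); j += 1   (state = (L, x, j); the loop index is unused)
def geraSeqStep (st : List Int × Int × Int) (_i : Int) : List Int × Int × Int :=
  let x := st.2.1 + st.2.2
  (st.1 ++ [x], x, st.2.2 + 1)

def geraSeq (n : Int) : List Int :=
  ((PySem.List.pyRange 0 n 1).foldl geraSeqStep ([], 1, 0)).1

-- ===== PORT B =====
def geraSeq_alt (n : Int) : List Int :=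
  (PySem.List.pyRange 0 n 1).map (fun i => 1 + PySem.Int.floordiv (i * (i + 1)) 2)

-- ===== PRECONDITION & SPEC =====
def Spec_geraSeq (n : Int) (out : List Int) : Prop := out = geraSeq_alt n
instance (n : Int) (out : List Int) : Decidable (Spec_geraSeq n out) := by unfold Spec_geraSeq; infer_instance

-- ===== CLAIM (what is proved, stated in full; the proofs are below) =====
def Claim_equal_geraSeq : Prop := ∀ (n : Int), Dom_geraSeq n → Spec_geraSeq n (geraSeq n)

-- ===== LEMMAS AND PROOFS =====

-- triangular-number step: m(m-1)//2 + m = m(m+1)//2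
lemma fd_step (m : Int) :
    PySem.Int.floordiv (m * (m - 1)) 2 + m = PySem.Int.floordiv (m * (m + 1)) 2 := by
  rw [PySem.Int.floordiv_eq_ediv_of_pos (a := m * (m - 1)) (by norm_num),
      PySem.Int.floordiv_eq_ediv_of_pos (a := m * (m + 1)) (by norm_num)]
  have h : m * (m + 1) = m * (m - 1) + m * 2 := by ring
  rw [h, Int.add_mul_ediv_right _ _ (by norm_num)]

-- loop invariant: after m iterations, L holds the closed-form prefix,
-- x = 1 + m(m-1)//2 and j = m
lemma geraSeq_inv (m : Nat) :
    ((List.range m).map (fun k : Nat => (k : Int))).foldl geraSeqStep ([], 1, 0)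
    = ((List.range m).map (fun k : Nat => (1 : Int) + PySem.Int.floordiv ((k : Int) * ((k : Int) + 1)) 2),
       1 + PySem.Int.floordiv ((m : Int) * ((m : Int) - 1)) 2, (m : Int)) := by
  induction m with
  | zero => simp [PySem.Int.floordiv]
  | succ m ih =>
      rw [List.range_succ, List.map_append, List.foldl_append, ih, List.map_append]
      simp only [List.map_cons, List.map_nil, List.foldl_cons, List.foldl_nil, geraSeqStep]
      have hx : (1 : Int) + PySem.Int.floordiv ((m : Int) * ((m : Int) - 1)) 2 + (m : Int)
          = 1 + PySem.Int.floordiv ((m : Int) * ((m : Int) + 1)) 2 := by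
        rw [add_assoc, fd_step]
      have hc : (((m + 1 : Nat)) : Int) * ((((m + 1 : Nat)) : Int) - 1) = (m : Int) * ((m : Int) + 1) := by
        push_cast; ring
      refine Prod.ext ?_ (Prod.ext ?_ ?_)
      · simp only [hx]
      · simp only [hc, hx]
      · push_cast; ring

theorem geraSeq_eq (n : Int) : geraSeq n = geraSeq_alt n := by
  unfold geraSeq geraSeq_alt
  rw [PySem.List.pyRange_one]
  simp only [sub_zero, zero_add]
  rw [geraSeq_inv n.toNat]
  simp [List.map_map, Function.comp]

-- ===== VERDICT (by name: the statement is the Claim_ definition above) =====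
theorem geraSeq_spec : Claim_equal_geraSeq := by
  intro n _
  unfold Spec_geraSeq
  exact geraSeq_eq n
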